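-- pv_equiv track=rewrite | github.com/pwkasay/anzu-data-exporter | GenerateCSV/main.py | organize_cleaned_deals
-- ===== SOURCE A (Python) =====
-- def organize_cleaned_deals(cleaned_deals):
--     deals_dict = {}
--     for deal in cleaned_deals:
--         broad_category = deal['broad_category_updated']
--         if broad_category not in deals_dict:
--             deals_dict[broad_category] = [deal]
--         else:
--             deals_dict[broad_category].append(deal)
--     return deals_dict
-- ===== SOURCE B (Python) =====
-- def organize_cleaned_deals(cleaned_deals):
--     categories = list(dict.fromkeys(d['broad_category_updated'] for d in cleaned_deals))
--     return {c: [d for d in cleaned_deals if d['broad_category_updated'] == c]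
--             for c in categories}
-- ===== Notes on version B (the rewrite author's own statement) =====
-- stated objective: alternative
-- what changed: Replaces A's single dict-building pass (membership test then insert-or-append per deal) with a two-phase computation: first the distinct categories in first-occurrence order via dict.fromkeys, then one filtering comprehension of the input per category.
import Mathlib
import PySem

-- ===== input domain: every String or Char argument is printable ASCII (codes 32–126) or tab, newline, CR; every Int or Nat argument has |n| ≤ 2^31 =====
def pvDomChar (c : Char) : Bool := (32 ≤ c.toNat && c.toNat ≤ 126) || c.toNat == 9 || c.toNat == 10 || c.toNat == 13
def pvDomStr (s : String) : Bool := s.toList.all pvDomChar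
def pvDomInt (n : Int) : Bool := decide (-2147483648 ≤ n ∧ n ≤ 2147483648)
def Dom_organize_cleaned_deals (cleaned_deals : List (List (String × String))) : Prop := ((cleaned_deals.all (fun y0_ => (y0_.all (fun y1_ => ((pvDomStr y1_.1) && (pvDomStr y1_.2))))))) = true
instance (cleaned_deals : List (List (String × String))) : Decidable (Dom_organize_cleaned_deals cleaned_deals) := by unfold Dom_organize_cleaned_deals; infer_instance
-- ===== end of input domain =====

-- B groups by first computing the distinct categories in first-occurrence order and then
-- filtering the input once per category, instead of A's single dict-building pass; objective:
-- alternative (same result, differently shaped computation; not claimed faster).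

-- ===== PORT A =====
-- deal['broad_category_updated'] : the deal is a Python dict; lookup via PySem.Dict (none = KeyError)
def pvKeyOf (deal : List (String × String)) : Option String :=
  (PySem.Dict.ofList deal).get? "broad_category_updated"

def organize_cleaned_deals (cleaned_deals : List (List (String × String))) : List (String × List (List (String × String))) :=
  (cleaned_deals.foldl (fun deals_dict deal =>
      match pvKeyOf deal with
      | none => deals_dict   -- Python raises KeyError here; excluded by Pre_
      | some broad_category =>
        if deals_dict.contains broad_category = false then
          deals_dict.insert broad_category [deal]
        else
          deals_dict.modify broad_category [] (fun l => l ++ [deal]))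
    PySem.Dict.empty).items

-- ===== PORT B =====
def organize_cleaned_deals_alt (cleaned_deals : List (List (String × String))) : List (String × List (List (String × String))) :=
  -- list(dict.fromkeys(...)) = PySem.List.dedup; a deal without the key would raise in Python (outside Pre_), filterMap skips it
  let categories := PySem.List.dedup (cleaned_deals.filterMap pvKeyOf)
  categories.map (fun c => (c, cleaned_deals.filter (fun d => pvKeyOf d == some c)))

-- ===== PRECONDITION & SPEC =====
-- Pre_ excludes exactly the inputs where Python A raises KeyError: a deal lacking 'broad_category_updated'.
def Pre_organize_cleaned_deals (cleaned_deals : List (List (String × String))) : Prop :=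
  (cleaned_deals.all (fun deal => (PySem.Dict.ofList deal).contains "broad_category_updated")) = true
instance (cleaned_deals : List (List (String × String))) : Decidable (Pre_organize_cleaned_deals cleaned_deals) := by unfold Pre_organize_cleaned_deals; infer_instance

def pvWitness_organize_cleaned_deals : (List (List (String × String))) :=
  [[("broad_category_updated", "tech"), ("name", "d1")],
   [("broad_category_updated", "retail")],
   [("broad_category_updated", "tech"), ("name", "d3")]]

def Spec_organize_cleaned_deals (cleaned_deals : List (List (String × String))) (out : List (String × List (List (String × String)))) : Prop := out = organize_cleaned_deals_alt cleaned_deals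
instance (cleaned_deals : List (List (String × String))) (out : List (String × List (List (String × String)))) : Decidable (Spec_organize_cleaned_deals cleaned_deals out) := by unfold Spec_organize_cleaned_deals; infer_instance

-- ===== CLAIM (what is proved, stated in full; the proofs are below) =====
def Claim_equal_organize_cleaned_deals : Prop := ∀ (cleaned_deals : List (List (String × String))), Dom_organize_cleaned_deals cleaned_deals → Pre_organize_cleaned_deals cleaned_deals → Spec_organize_cleaned_deals cleaned_deals (organize_cleaned_deals cleaned_deals)

-- ===== LEMMAS AND PROOFS =====

-- the (category, deal) pairs A actually processes
def pvPairs (cleaned_deals : List (List (String × String))) : List (String × List (String × String)) :=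
  cleaned_deals.filterMap (fun deal => (pvKeyOf deal).map (fun c => (c, deal)))

theorem pv_insert_eq_modify {κ ν : Type} [BEq κ] [LawfulBEq κ] (d : PySem.Dict κ (List ν)) (k : κ) (v : ν)
    (h : d.contains k = false) : d.insert k [v] = d.modify k [] (fun l => l ++ [v]) := by
  apply PySem.Dict.ext
  rw [PySem.Dict.items_insert_of_not_contains d [v] h]
  simp [PySem.Dict.modify, h, PySem.Dict.insert]
  exact PySem.Dict.getD_of_not_contains _ _ h

theorem pv_fold_eq (cleaned_deals : List (List (String × String))) (d : PySem.Dict String (List (List (String × String)))) :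
    cleaned_deals.foldl (fun deals_dict deal =>
      match pvKeyOf deal with
      | none => deals_dict
      | some broad_category =>
        if deals_dict.contains broad_category = false then
          deals_dict.insert broad_category [deal]
        else
          deals_dict.modify broad_category [] (fun l => l ++ [deal])) d
    = (pvPairs cleaned_deals).foldl (fun dd p => dd.modify p.1 [] (fun l => l ++ [p.2])) d := by
  induction cleaned_deals generalizing d with
  | nil => rfl
  | cons deal rest ih =>
    simp only [List.foldl_cons, pvPairs, List.filterMap_cons]
    cases hk : pvKeyOf deal with
    | none => simpa [pvPairs] using ih d
    | some c =>
      simp only [Option.map_some, List.foldl_cons]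
      by_cases hc : d.contains c = false
      · rw [if_pos hc, pv_insert_eq_modify d c deal hc]
        simpa [pvPairs] using ih _
      · rw [if_neg hc]
        simpa [pvPairs] using ih _

theorem pv_map_fst_pairs (cleaned_deals : List (List (String × String))) :
    (pvPairs cleaned_deals).map (fun p => p.1) = cleaned_deals.filterMap pvKeyOf := by
  simp [pvPairs, List.map_filterMap, Function.comp_def]

theorem pv_filter_pairs (cleaned_deals : List (List (String × String))) (c : String) :
    ((pvPairs cleaned_deals).filter (fun p => p.1 == c)).map (fun p => p.2)
      = cleaned_deals.filter (fun d => pvKeyOf d == some c) := by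
  induction cleaned_deals with
  | nil => rfl
  | cons deal rest ih =>
    simp only [pvPairs, List.filterMap_cons, List.filter_cons]
    cases hk : pvKeyOf deal with
    | none => simpa [pvPairs, hk] using ih
    | some k =>
      by_cases hkc : k = c
      · subst hkc; simpa [pvPairs, hk] using ih
      · simpa [pvPairs, hk, hkc] using ih

-- ===== VERDICT (by name: the statement is the Claim_ definition above) =====
theorem organize_cleaned_deals_spec : Claim_equal_organize_cleaned_deals := by
  intro cleaned_deals _ _
  unfold Spec_organize_cleaned_deals organize_cleaned_deals organize_cleaned_deals_alt
  rw [pv_fold_eq]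
  have hnd : ((pvPairs cleaned_deals).foldl (fun dd p => dd.modify p.1 [] (fun l => l ++ [p.2])) PySem.Dict.empty).keys.Nodup := by
    apply PySem.Dict.nodup_keys_foldl_modify_key (pvPairs cleaned_deals) (fun p => p.1) [] (fun _ p => fun l => l ++ [p.2])
    simp
  rw [PySem.Dict.items_eq_map_keys _ hnd []]
  rw [PySem.Dict.keys_foldl_modify_key (pvPairs cleaned_deals) (fun p => p.1) [] (fun _ p => fun l => l ++ [p.2])]
  have hupd : PySem.Set.update ([] : List String) (List.map (fun p => p.1) (pvPairs cleaned_deals)) = PySem.Set.ofList (List.map (fun p => p.1) (pvPairs cleaned_deals)) := rfl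
  rw [PySem.Dict.keys_empty, hupd, pv_map_fst_pairs]
  simp only [PySem.List.dedup_eq_ofList]
  refine List.map_congr_left (fun c _ => ?_)
  simp only [PySem.Dict.getD_foldl_modify_append, PySem.Dict.getD_empty, List.nil_append, pv_filter_pairs]
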